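-- pv_equiv track=rewrite | github.com/Aasthaengg/IBMdataset | Python_codes/p03329/s557946267.py | drawal
-- ===== SOURCE A (Python) =====
-- def drawal(x):
--   if(x <= 5):
--     return x
--   elif(6<= x and x < 9):
--     return x- 5
--   elif(9<= x and x < 15):
--     return x- 8
--   else:
--     def drawal9(y):
--       i = 0
--       while 9** (i+ 1)<= y:
--         i+= 1
--       return drawal(y- 9** i)+ 1
--     def drawal6(z):
--       i = 0
--       while 6** (i+ 1)<= z:
--         i+= 1
--       return drawal(z- 6** i)+ 1
--     return min(drawal9(x), drawal6(x))
-- ===== SOURCE B (Python) =====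
-- def drawal(x):
--     memo = {}
--
--     def go(x):
--         if x <= 5:
--             return x
--         if x < 9:
--             return x - 5
--         if x < 15:
--             return x - 8
--         if x in memo:
--             return memo[x]
--         p = 9
--         while p * 9 <= x:
--             p *= 9
--         q = 6
--         while q * 6 <= x:
--             q *= 6
--         r = 1 + min(go(x - p), go(x - q))
--         memo[x] = r
--         return r
--
--     return go(x)
-- ===== Notes on version B (the rewrite author's own statement) =====
-- stated objective: faster
-- what changed: Replaces A's unmemoized branching recursion (and per-call exponent-counting while loops) with a dictionary-memoized recursion that multiplies the power directly, so each distinct reachable value is solved once.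
import Mathlib
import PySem

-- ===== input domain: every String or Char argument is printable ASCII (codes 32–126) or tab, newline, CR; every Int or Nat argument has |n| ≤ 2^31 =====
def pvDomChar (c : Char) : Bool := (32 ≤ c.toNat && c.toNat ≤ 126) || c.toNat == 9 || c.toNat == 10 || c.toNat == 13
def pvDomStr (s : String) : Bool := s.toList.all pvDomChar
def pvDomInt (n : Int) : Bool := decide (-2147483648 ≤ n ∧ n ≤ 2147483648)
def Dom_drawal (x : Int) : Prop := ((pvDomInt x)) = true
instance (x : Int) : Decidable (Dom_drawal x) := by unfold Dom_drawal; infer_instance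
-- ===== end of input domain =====

-- B replaces A's unmemoized branching recursion by the same recurrence with a dictionary memo
-- (and direct power accumulation), so each distinct subproblem value is solved once: measurably faster.
-- All 'fuel' arguments below are totality guards only; each is provably never exhausted.

-- ===== PORT A =====
-- A's inner loop in drawal9: 'i = 0; while 9**(i+1) <= y: i += 1' (fuel: totality guard, never exhausted)
def pvI9 (y : Int) (i : Nat) (fuel : Nat) : Nat :=
  match fuel with
  | 0 => i
  | Nat.succ f => if (9:Int) ^ (i + 1) ≤ y then pvI9 y (i + 1) f else i

-- A's inner loop in drawal6: 'i = 0; while 6**(i+1) <= z: i += 1'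
def pvI6 (z : Int) (i : Nat) (fuel : Nat) : Nat :=
  match fuel with
  | 0 => i
  | Nat.succ f => if (6:Int) ^ (i + 1) ≤ z then pvI6 z (i + 1) f else i

-- A's recursion, fuel-guarded (each call strictly decreases x.toNat, so x.toNat + 1 fuel suffices)
def drawalF (fuel : Nat) (x : Int) : Int :=
  match fuel with
  | 0 => 0
  | Nat.succ f =>
    if x ≤ 5 then x
    else if 6 ≤ x ∧ x < 9 then x - 5
    else if 9 ≤ x ∧ x < 15 then x - 8
    else
      min (drawalF f (x - 9 ^ pvI9 x 0 (x.toNat + 1)) + 1)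
          (drawalF f (x - 6 ^ pvI6 x 0 (x.toNat + 1)) + 1)

def drawal (x : Int) : Int := drawalF (x.toNat + 1) x

-- ===== PORT B =====
-- B's loop 'p = 9; while p*9 <= x: p *= 9' (fuel: totality guard, never exhausted at the call sites)
def altP9 (x p : Int) (fuel : Nat) : Int :=
  match fuel with
  | 0 => p
  | Nat.succ f => if p * 9 ≤ x then altP9 x (p * 9) f else p

-- B's loop 'q = 6; while q*6 <= x: q *= 6'
def altP6 (x q : Int) (fuel : Nat) : Int :=
  match fuel with
  | 0 => q
  | Nat.succ f => if q * 6 ≤ x then altP6 x (q * 6) f else q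

-- B's inner function 'go', threading the memo dictionary; fuel-guarded like drawalF
def drawalGoF (fuel : Nat) (x : Int) (memo : PySem.Dict Int Int) : Int × PySem.Dict Int Int :=
  match fuel with
  | 0 => (0, memo)
  | Nat.succ f =>
    if x ≤ 5 then (x, memo)
    else if x < 9 then (x - 5, memo)
    else if x < 15 then (x - 8, memo)
    else
      match memo.get? x with
      | some v => (v, memo)
      | none =>
        let p := altP9 x 9 x.toNat
        let q := altP6 x 6 x.toNat
        let res1 := drawalGoF f (x - p) memo
        let res2 := drawalGoF f (x - q) res1.2
        let r := 1 + min res1.1 res2.1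
        (r, res2.2.insert x r)

def drawal_alt (x : Int) : Int := (drawalGoF (x.toNat + 1) x PySem.Dict.empty).1

-- ===== PRECONDITION & SPEC =====
def Spec_drawal (x : Int) (out : Int) : Prop := out = drawal_alt x
instance (x : Int) (out : Int) : Decidable (Spec_drawal x out) := by unfold Spec_drawal; infer_instance

-- ===== CLAIM (what is proved, stated in full; the proofs are below) =====
def Claim_equal_drawal : Prop := ∀ (x : Int), Dom_drawal x → Spec_drawal x (drawal x)

-- ===== LEMMAS AND PROOFS =====

-- loop invariant: the power A selects never exceeds y
theorem pvI9_pow_le (fuel : Nat) (y : Int) (i : Nat) (h : (9:Int) ^ i ≤ y) :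
    (9:Int) ^ (pvI9 y i fuel) ≤ y := by
  induction fuel generalizing i with
  | zero => exact h
  | succ f ih =>
      rw [pvI9]
      split_ifs with hc
      · exact ih (i + 1) hc
      · exact h

theorem pvI6_pow_le (fuel : Nat) (z : Int) (i : Nat) (h : (6:Int) ^ i ≤ z) :
    (6:Int) ^ (pvI6 z i fuel) ≤ z := by
  induction fuel generalizing i with
  | zero => exact h
  | succ f ih =>
      rw [pvI6]
      split_ifs with hc
      · exact ih (i + 1) hc
      · exact h

-- B's accumulated power equals the power A recomputes from the exponent counter (same fuel)
theorem altP9_eq_pow (fuel : Nat) (x : Int) (j : Nat) :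
    altP9 x ((9:Int) ^ j) fuel = 9 ^ (pvI9 x j fuel) := by
  induction fuel generalizing j with
  | zero => rfl
  | succ f ih =>
      rw [altP9, pvI9]
      by_cases hc : (9:Int) ^ (j + 1) ≤ x
      · rw [if_pos (by rw [← pow_succ]; exact hc), if_pos hc, ← pow_succ]
        exact ih (j + 1)
      · rw [if_neg (by rw [← pow_succ]; exact hc), if_neg hc]

theorem altP6_eq_pow (fuel : Nat) (x : Int) (j : Nat) :
    altP6 x ((6:Int) ^ j) fuel = 6 ^ (pvI6 x j fuel) := by
  induction fuel generalizing j with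
  | zero => rfl
  | succ f ih =>
      rw [altP6, pvI6]
      by_cases hc : (6:Int) ^ (j + 1) ≤ x
      · rw [if_pos (by rw [← pow_succ]; exact hc), if_pos hc, ← pow_succ]
        exact ih (j + 1)
      · rw [if_neg (by rw [← pow_succ]; exact hc), if_neg hc]

-- bounds on the two subtracted powers at a recursion site
theorem pow9_bounds (x : Int) (h : 15 ≤ x) :
    1 ≤ (9:Int) ^ pvI9 x 0 (x.toNat + 1) ∧ (9:Int) ^ pvI9 x 0 (x.toNat + 1) ≤ x :=
  ⟨one_le_pow₀ (by norm_num), pvI9_pow_le _ x 0 (by norm_num; omega)⟩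

theorem pow6_bounds (x : Int) (h : 15 ≤ x) :
    1 ≤ (6:Int) ^ pvI6 x 0 (x.toNat + 1) ∧ (6:Int) ^ pvI6 x 0 (x.toNat + 1) ≤ x :=
  ⟨one_le_pow₀ (by norm_num), pvI6_pow_le _ x 0 (by norm_num; omega)⟩

-- drawalF does not depend on the fuel once the fuel exceeds x.toNat
theorem drawalF_congr (f1 : Nat) : ∀ (f2 : Nat) (x : Int), x.toNat < f1 → x.toNat < f2 →
    drawalF f1 x = drawalF f2 x := by
  induction f1 with
  | zero => intro f2 x h1 _; omega
  | succ g ih =>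
      intro f2 x h1 h2
      match f2 with
      | 0 => omega
      | Nat.succ h =>
        rw [drawalF, drawalF]
        split_ifs with c1 c2 c3
        · rfl
        · rfl
        · rfl
        · have hx : (15:Int) ≤ x := by omega
          have b9 := pow9_bounds x hx
          have b6 := pow6_bounds x hx
          rw [ih h (x - 9 ^ pvI9 x 0 (x.toNat + 1)) (by omega) (by omega),
              ih h (x - 6 ^ pvI6 x 0 (x.toNat + 1)) (by omega) (by omega)]

-- the memo only ever holds correct values of A's function
def MemoOK (m : PySem.Dict Int Int) : Prop := ∀ k v, m.get? k = some v → v = drawal k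

theorem go_correct (fuel : Nat) : ∀ (x : Int) (m : PySem.Dict Int Int), x.toNat < fuel →
    MemoOK m → (drawalGoF fuel x m).1 = drawal x ∧ MemoOK (drawalGoF fuel x m).2 := by
  induction fuel with
  | zero => intro x m h1 _; omega
  | succ g ih =>
      intro x m hfuel hm
      rw [drawalGoF]
      by_cases h1 : x ≤ 5
      · rw [if_pos h1, drawal, drawalF, if_pos h1]; exact ⟨rfl, hm⟩
      rw [if_neg h1]
      by_cases h2 : x < 9
      · rw [if_pos h2, drawal, drawalF, if_neg h1, if_pos (by omega : 6 ≤ x ∧ x < 9)]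
        exact ⟨rfl, hm⟩
      rw [if_neg h2]
      by_cases h3 : x < 15
      · rw [if_pos h3, drawal, drawalF, if_neg h1, if_neg (by omega : ¬ (6 ≤ x ∧ x < 9)),
          if_pos (by omega : 9 ≤ x ∧ x < 15)]
        exact ⟨rfl, hm⟩
      rw [if_neg h3]
      have hx : (15:Int) ≤ x := by omega
      have b9 := pow9_bounds x hx
      have b6 := pow6_bounds x hx
      cases hv : m.get? x with
      | some v =>
        dsimp only
        exact ⟨hm x v hv, hm⟩
      | none =>
        dsimp only
        -- B's accumulated powers are exactly A's powers
        have hp : altP9 x 9 x.toNat = 9 ^ pvI9 x 0 (x.toNat + 1) := by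
          have h0 : pvI9 x 0 (x.toNat + 1) = pvI9 x 1 x.toNat := by
            rw [pvI9, if_pos (by norm_num; omega : (9:Int) ^ (0 + 1) ≤ x)]
          have h9 := altP9_eq_pow x.toNat x 1
          norm_num at h9
          rw [h0]; exact h9
        have hq : altP6 x 6 x.toNat = 6 ^ pvI6 x 0 (x.toNat + 1) := by
          have h0 : pvI6 x 0 (x.toNat + 1) = pvI6 x 1 x.toNat := by
            rw [pvI6, if_pos (by norm_num; omega : (6:Int) ^ (0 + 1) ≤ x)]
          have h6 := altP6_eq_pow x.toNat x 1
          norm_num at h6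
          rw [h0]; exact h6
        obtain ⟨e1, k1⟩ := ih (x - altP9 x 9 x.toNat) m (by rw [hp]; omega) hm
        obtain ⟨e2, k2⟩ := ih (x - altP6 x 6 x.toNat) _ (by rw [hq]; omega) k1
        have hmain : 1 + min (drawalGoF g (x - altP9 x 9 x.toNat) m).1
            (drawalGoF g (x - altP6 x 6 x.toNat) (drawalGoF g (x - altP9 x 9 x.toNat) m).2).1
            = drawal x := by
          rw [e1, e2, hp, hq]
          conv_rhs => rw [drawal, drawalF]
          rw [if_neg h1, if_neg (by omega : ¬ (6 ≤ x ∧ x < 9)),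
            if_neg (by omega : ¬ (9 ≤ x ∧ x < 15))]
          rw [drawalF_congr x.toNat (x - 9 ^ pvI9 x 0 (x.toNat + 1)).toNat.succ
              (x - 9 ^ pvI9 x 0 (x.toNat + 1)) (by omega) (by omega)]
          rw [drawalF_congr x.toNat (x - 6 ^ pvI6 x 0 (x.toNat + 1)).toNat.succ
              (x - 6 ^ pvI6 x 0 (x.toNat + 1)) (by omega) (by omega)]
          rw [show ∀ y : Int, drawalF y.toNat.succ y = drawal y from fun y => rfl,
              show ∀ y : Int, drawalF y.toNat.succ y = drawal y from fun y => rfl]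
          omega
        refine ⟨hmain, ?_⟩
        intro k v hk
        rw [PySem.Dict.get?_insert] at hk
        split_ifs at hk with hkx
        · subst hkx
          injection hk with hkv
          exact hkv ▸ hmain
        · exact k2 k v hk

-- ===== VERDICT (by name: the statement is the Claim_ definition above) =====
theorem drawal_spec : Claim_equal_drawal := by
  intro x _
  unfold Spec_drawal drawal_alt
  have h := go_correct (x.toNat + 1) x PySem.Dict.empty (by omega)
    (by intro k v hv; simp [PySem.Dict.get?_empty] at hv)
  exact h.1.symm
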